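-- pv_equiv track=rewrite | github.com/BOLTB0X/DataStructure_Argolithm | 코딩테스트 고득점 Kit/힙/더 맵게/더 맵게.py | solution
-- ===== SOURCE A (Python) =====
-- import heapq
--
-- def solution(scoville, K):
--     answer = 0
--     pq = []
--
--     for s in scoville:
--         heapq.heappush(pq, s)
--
--     while pq[0] < K:
--         heapq.heappush(pq, heapq.heappop(pq) + heapq.heappop(pq) * 2)
--         answer += 1
--
--         if len(pq) == 1 and pq[0] < K:
--             answer = -1
--             break
--
--     return answer
-- ===== SOURCE B (Python) =====
-- def solution(scoville, K):
--     # Two monotone queues instead of a priority queue: the sorted originals and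
--     # the mixed results (which are produced in nondecreasing order), merged by
--     # two index pointers -- no heap / no re-insertion ever needed.
--     base = sorted(scoville)
--     mixed = []
--     i = 0
--     j = 0
--     answer = 0
--     while True:
--         if i < len(base) and (j == len(mixed) or base[i] <= mixed[j]):
--             cur = base[i]
--         else:
--             cur = mixed[j]
--         if cur >= K:
--             return answer
--         if i < len(base) and (j == len(mixed) or base[i] <= mixed[j]):
--             a = base[i]
--             i += 1
--         else:
--             a = mixed[j]
--             j += 1
--         if i < len(base) and (j == len(mixed) or base[i] <= mixed[j]):
--             b = base[i]
--             i += 1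
--         else:
--             b = mixed[j]
--             j += 1
--         mixed.append(a + 2 * b)
--         answer += 1
--         if (len(base) - i) + (len(mixed) - j) == 1 and mixed[j] < K:
--             return -1
-- ===== Notes on version B (the rewrite author's own statement) =====
-- stated objective: faster
-- what changed: Replaces the priority queue with the two-monotone-queue technique: sort the input once, keep mixed results in a FIFO list (they are provably produced in nondecreasing order), and take each minimum by comparing the fronts of the two queues via index pointers - O(1) per mix with no heap sift and no re-insertion.
import Mathlib
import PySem

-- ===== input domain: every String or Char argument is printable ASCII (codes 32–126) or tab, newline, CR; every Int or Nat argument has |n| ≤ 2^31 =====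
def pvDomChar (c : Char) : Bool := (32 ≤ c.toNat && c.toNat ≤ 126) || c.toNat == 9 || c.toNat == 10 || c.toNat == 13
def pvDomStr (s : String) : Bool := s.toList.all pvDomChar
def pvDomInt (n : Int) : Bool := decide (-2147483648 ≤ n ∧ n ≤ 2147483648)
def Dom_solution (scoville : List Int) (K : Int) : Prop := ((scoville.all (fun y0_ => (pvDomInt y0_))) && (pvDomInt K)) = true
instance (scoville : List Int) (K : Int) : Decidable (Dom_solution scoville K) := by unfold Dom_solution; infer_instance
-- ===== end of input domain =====

-- B drops A's priority queue for the two-monotone-queue technique: sort once,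
-- keep mixed results in a FIFO (they come out in nondecreasing order), and read
-- minima off the two queue fronts by index pointers. Same value wherever the
-- Python A returns (A raises IndexError on [] and on a single element below K —
-- excluded by Pre_; B raises there too).

-- ===== PORT A =====
-- A calls heapq; heappush/heappop are ported as a literal binary min-heap on a
-- list (sift-up on push, move-last-to-root + sift-down on pop), exact on values.
def lget (h : List Int) (i : Nat) : Int := h.getD i 0

def siftdownA (h : List Int) (pos : Nat) : List Int :=
  if _h0 : pos = 0 then h else
    let parent := (pos - 1) / 2
    if lget h pos < lget h parent then
      siftdownA ((h.set pos (lget h parent)).set parent (lget h pos)) parent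
    else h
termination_by pos
decreasing_by omega

def heappushA (h : List Int) (x : Int) : List Int := siftdownA (h ++ [x]) h.length

-- CPython's child selection: the right child if it exists and is not greater, else the left
def minChild (h : List Int) (pos : Nat) : Nat :=
  if 2 * pos + 2 < h.length ∧ ¬ lget h (2 * pos + 1) < lget h (2 * pos + 2) then 2 * pos + 2
  else 2 * pos + 1

def siftupA (h : List Int) (pos : Nat) : List Int :=
  if _hl : 2 * pos + 1 < h.length then
    if lget h (minChild h pos) < lget h pos then
      siftupA ((h.set pos (lget h (minChild h pos))).set (minChild h pos) (lget h pos)) (minChild h pos)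
    else h
  else h
termination_by h.length - pos
decreasing_by simp only [List.length_set]; unfold minChild; split <;> omega

def heappopA (h : List Int) : Int × List Int :=
  match h.getLast? with
  | none => (0, [])   -- Python raises IndexError here; unreachable under Pre_
  | some last =>
    let rest := h.dropLast
    if rest.isEmpty then (last, [])
    else (lget rest 0, siftupA (rest.set 0 last) 0)

def loopA : Nat → List Int → Int → Int → Int
  | 0, _, _, answer => answer
  | fuel + 1, pq, K, answer =>
    if lget pq 0 < K then
      let p1 := heappopA pq
      let p2 := heappopA p1.2
      let pq3 := heappushA p2.2 (p1.1 + p2.1 * 2)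
      if pq3.length = 1 ∧ lget pq3 0 < K then -1
      else loopA fuel pq3 K (answer + 1)
    else answer

def solution (scoville : List Int) (K : Int) : Int :=
  loopA (scoville.length + 1) (scoville.foldl heappushA []) K 0

-- ===== PORT B =====
-- the shared front test 'i < len(base) and (j == len(mixed) or base[i] <= mixed[j])'
def frontB (base mixed : List Int) (i j : Nat) : Int :=
  if i < base.length ∧ (j = mixed.length ∨ lget base i ≤ lget mixed j)
  then lget base i else lget mixed j

-- one 'pop the smaller front' step of Source B: the value and the advanced pointers
def popB (base mixed : List Int) (i j : Nat) : Int × Nat × Nat :=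
  if i < base.length ∧ (j = mixed.length ∨ lget base i ≤ lget mixed j)
  then (lget base i, i + 1, j) else (lget mixed j, i, j + 1)

def loopB : Nat → List Int → List Int → Nat → Nat → Int → Int → Int
  | 0, _, _, _, _, _, answer => answer
  | fuel + 1, base, mixed, i, j, K, answer =>
    if frontB base mixed i j < K then
      let p1 := popB base mixed i j
      let p2 := popB base mixed p1.2.1 p1.2.2
      let mixed2 := mixed ++ [p1.1 + 2 * p2.1]
      if (base.length - p2.2.1) + (mixed2.length - p2.2.2) = 1 ∧ lget mixed2 p2.2.2 < K
      then -1
      else loopB fuel base mixed2 p2.2.1 p2.2.2 K (answer + 1)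
    else answer

def solution_alt (scoville : List Int) (K : Int) : Int :=
  loopB (scoville.length + 1) (PySem.List.sorted scoville (fun x => x) false) [] 0 0 K 0

-- ===== PRECONDITION & SPEC =====
-- Pre_ excludes exactly the inputs where the Python A raises IndexError:
-- the empty list (pq[0]) and a single element below K (second heappop on an
-- empty heap). B raises IndexError on the same inputs.
def Pre_solution (scoville : List Int) (K : Int) : Prop :=
  scoville ≠ [] ∧ (scoville.length = 1 → K ≤ scoville.headI)
instance (scoville : List Int) (K : Int) : Decidable (Pre_solution scoville K) := by
  unfold Pre_solution; infer_instance

def pvWitness_solution : List Int × Int := ([1, 2, 3], 7)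

def Spec_solution (scoville : List Int) (K : Int) (out : Int) : Prop := out = solution_alt scoville K
instance (scoville : List Int) (K : Int) (out : Int) : Decidable (Spec_solution scoville K out) := by unfold Spec_solution; infer_instance

-- ===== CLAIM (what is proved, stated in full; the proofs are below) =====
def Claim_equal_solution : Prop := ∀ (scoville : List Int) (K : Int), Dom_solution scoville K → Pre_solution scoville K → Spec_solution scoville K (solution scoville K)

-- ===== LEMMAS AND PROOFS =====

def IsHeap (h : List Int) : Prop :=
  ∀ i : Nat, 0 < i → i < h.length → lget h ((i - 1) / 2) ≤ lget h i

theorem lget_eq_getElem (h : List Int) (i : Nat) (hi : i < h.length) : lget h i = h[i] := by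
  simp [lget, List.getD_eq_getElem?_getD, List.getElem?_eq_getElem hi]

theorem lget_set (h : List Int) (i j : Nat) (a : Int) :
    lget (h.set i a) j = if i = j ∧ i < h.length then a else lget h j := by
  by_cases hij : i = j
  · subst hij
    by_cases hi : i < h.length
    · simp [lget, List.getD_eq_getElem?_getD, hi]
    · simp [lget, List.set_eq_of_length_le (by omega : h.length ≤ i), hi]
  · simp [lget, List.getD_eq_getElem?_getD, List.getElem?_set_ne hij, hij]

theorem lget_swap (h : List Int) (i j t : Nat) (a b : Int) (hi : i < h.length) (hj : j < h.length) (hij : i ≠ j) :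
    lget ((h.set i a).set j b) t = if t = j then b else if t = i then a else lget h t := by
  rw [lget_set, lget_set]
  simp only [List.length_set]
  by_cases h1 : t = j <;> by_cases h2 : t = i <;> simp [h1, h2, hij, hi, hj] <;> omega

theorem set_set_perm (h : List Int) (i j : Nat) (hi : i < h.length) (hj : j < h.length) :
    ((h.set i (lget h j)).set j (lget h i)).Perm h := by
  rw [List.perm_iff_count]
  intro b
  have hi1 : h[i] = b → 1 ≤ List.count b h := fun e => by
    exact List.one_le_count_iff.2 (e ▸ h.getElem_mem hi)
  have hj1 : h[j] = b → 1 ≤ List.count b h := fun e => by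
    exact List.one_le_count_iff.2 (e ▸ h.getElem_mem hj)
  rw [List.count_set (by simpa using hj), List.count_set hi]
  rw [lget_eq_getElem h i hi, lget_eq_getElem h j hj]
  by_cases hij : i = j
  · subst hij
    simp only [List.getElem_set_self]
    split_ifs with h1 <;> simp_all
  · rw [List.getElem_set_ne (by omega)]
    split_ifs with h1 <;> simp_all

theorem isHeap_root_le (h : List Int) (hh : IsHeap h) :
    ∀ i : Nat, i < h.length → lget h 0 ≤ lget h i := by
  intro i
  induction i using Nat.strong_induction_on with
  | _ i ih =>
    intro hi
    rcases Nat.eq_zero_or_pos i with h0 | h0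
    · subst h0; exact le_refl _
    · exact le_trans (ih ((i - 1) / 2) (by omega) (by omega)) (hh i h0 hi)

theorem siftdownA_perm (h : List Int) (pos : Nat) (hp : pos < h.length) :
    (siftdownA h pos).Perm h := by
  induction h, pos using siftdownA.induct with
  | case1 h => simp [siftdownA]
  | case2 h pos h0 parent hlt ih =>
    rw [siftdownA, dif_neg h0, if_pos hlt]
    exact (ih (by simpa using (by omega : (pos - 1) / 2 < h.length))).trans
      (set_set_perm h pos ((pos - 1) / 2) hp (by omega))
  | case3 h pos h0 parent hlt =>
    rw [siftdownA, dif_neg h0, if_neg hlt]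

theorem siftdownA_isHeap (h : List Int) (pos : Nat) (hp : pos < h.length)
    (h1 : ∀ i : Nat, 0 < i → i < h.length → i ≠ pos → lget h ((i - 1) / 2) ≤ lget h i)
    (h2 : ∀ c : Nat, c < h.length → 0 < c → (c - 1) / 2 = pos → 0 < pos →
      lget h ((pos - 1) / 2) ≤ lget h c) :
    IsHeap (siftdownA h pos) := by
  revert hp h1 h2
  induction h, pos using siftdownA.induct with
  | case1 h =>
    intro hp h1 h2 i hi0 hin
    rw [siftdownA] at hin ⊢
    exact h1 i hi0 hin (by omega)
  | case2 h pos h0 parent hlt ih =>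
    intro hp h1 h2
    have hpn : (pos - 1) / 2 < h.length := by omega
    have hpp : pos ≠ (pos - 1) / 2 := by omega
    have key : ∀ t, lget ((h.set pos (lget h ((pos - 1) / 2))).set ((pos - 1) / 2) (lget h pos)) t
        = if t = (pos - 1) / 2 then lget h pos else if t = pos then lget h ((pos - 1) / 2) else lget h t :=
      fun t => lget_swap h pos ((pos - 1) / 2) t _ _ hp hpn hpp
    rw [siftdownA, dif_neg h0, if_pos hlt]
    apply ih
    · simpa using hpn
    · intro i hi0 hin hip
      simp only [List.length_set] at hin
      rw [key i, key ((i - 1) / 2)]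
      by_cases e1 : (i - 1) / 2 = (pos - 1) / 2
      · rw [if_pos e1]
        by_cases e2 : i = pos
        · rw [if_neg (show i ≠ (pos - 1) / 2 from hip), if_pos e2]
          exact le_of_lt hlt
        · rw [if_neg (show i ≠ (pos - 1) / 2 from hip), if_neg e2]
          have := h1 i hi0 hin e2
          rw [e1] at this
          exact le_trans (le_of_lt hlt) this
      · rw [if_neg e1]
        by_cases e2 : (i - 1) / 2 = pos
        · rw [if_pos e2, if_neg (show i ≠ (pos - 1) / 2 from hip), if_neg (show i ≠ pos by omega)]
          exact h2 i hin hi0 e2 (by omega)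
        · rw [if_neg e2, if_neg (show i ≠ (pos - 1) / 2 from hip), if_neg (show i ≠ pos by omega)]
          exact h1 i hi0 hin (by omega)
    · intro c hcn hc0 hcp hp0
      simp only [List.length_set] at hcn
      rw [key c, key (((pos - 1) / 2 - 1) / 2)]
      rw [if_neg (show ((pos - 1) / 2 - 1) / 2 ≠ (pos - 1) / 2 by omega),
          if_neg (show ((pos - 1) / 2 - 1) / 2 ≠ pos by omega)]
      by_cases e2 : c = pos
      · rw [if_neg (show c ≠ (pos - 1) / 2 by omega), if_pos e2]
        exact h1 ((pos - 1) / 2) hp0 hpn hpp.symm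
      · rw [if_neg (show c ≠ (pos - 1) / 2 by omega), if_neg e2]
        have := h1 c hc0 hcn e2
        rw [hcp] at this
        exact le_trans (h1 ((pos - 1) / 2) hp0 hpn hpp.symm) this
  | case3 h pos h0 parent hlt =>
    intro hp h1 h2 i hi0 hin
    rw [siftdownA, dif_neg h0, if_neg hlt] at hin ⊢
    by_cases e : i = pos
    · subst e
      exact le_of_not_gt (by simpa using hlt)
    · exact h1 i hi0 hin e

theorem lget_append_lt (h : List Int) (x : Int) (i : Nat) (hi : i < h.length) :
    lget (h ++ [x]) i = lget h i := by
  simp [lget, List.getD_eq_getElem?_getD, List.getElem?_append_left hi]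

theorem heappushA_perm (h : List Int) (x : Int) : (heappushA h x).Perm (x :: h) := by
  exact (siftdownA_perm (h ++ [x]) h.length (by simp)).trans (List.perm_append_singleton x h)

theorem heappushA_isHeap (h : List Int) (x : Int) (hh : IsHeap h) : IsHeap (heappushA h x) := by
  apply siftdownA_isHeap (h ++ [x]) h.length (by simp)
  · intro i hi0 hin hine
    simp only [List.length_append, List.length_singleton] at hin
    have hi : i < h.length := by omega
    rw [lget_append_lt h x i hi, lget_append_lt h x ((i - 1) / 2) (by omega)]
    exact hh i hi0 hi
  · intro c hcn hc0 hcp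
    simp only [List.length_append, List.length_singleton] at hcn
    omega

theorem minChild_facts (h : List Int) (pos : Nat) (hl : 2 * pos + 1 < h.length) :
    pos < minChild h pos ∧ minChild h pos < h.length ∧ (minChild h pos - 1) / 2 = pos := by
  unfold minChild; split <;> omega

theorem minChild_min (h : List Int) (pos : Nat) (hl : 2 * pos + 1 < h.length)
    (j : Nat) (hj : j < h.length) (hjp : (j - 1) / 2 = pos) (hj0 : 0 < j) :
    lget h (minChild h pos) ≤ lget h j := by
  by_cases hc : 2 * pos + 2 < h.length ∧ ¬ lget h (2 * pos + 1) < lget h (2 * pos + 2)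
  · unfold minChild
    rw [if_pos hc]
    rcases (by omega : j = 2 * pos + 1 ∨ j = 2 * pos + 2) with e | e <;> subst e
    · exact not_lt.1 hc.2
    · exact le_refl _
  · unfold minChild
    rw [if_neg hc]
    rcases (by omega : j = 2 * pos + 1 ∨ j = 2 * pos + 2) with e | e <;> subst e
    · exact le_refl _
    · rcases not_and_or.1 hc with hc' | hc'
      · omega
      · exact le_of_lt (not_not.1 hc')

theorem siftupA_perm (h : List Int) (pos : Nat) : (siftupA h pos).Perm h := by
  induction h, pos using siftupA.induct with
  | case1 h pos hl hswap ih =>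
    rw [siftupA, dif_pos hl, if_pos hswap]
    exact ih.trans (set_set_perm h pos (minChild h pos) (by omega) (minChild_facts h pos hl).2.1)
  | case2 h pos hl hswap =>
    rw [siftupA, dif_pos hl, if_neg hswap]
  | case3 h pos hl =>
    rw [siftupA, dif_neg hl]

theorem siftupA_isHeap (h : List Int) (pos : Nat)
    (h1 : ∀ i : Nat, 0 < i → i < h.length → (i - 1) / 2 ≠ pos → lget h ((i - 1) / 2) ≤ lget h i)
    (h2 : ∀ j : Nat, j < h.length → (j - 1) / 2 = pos → 0 < pos → lget h ((pos - 1) / 2) ≤ lget h j) :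
    IsHeap (siftupA h pos) := by
  revert h1 h2
  induction h, pos using siftupA.induct with
  | case1 h pos hl hswap ih =>
    intro h1 h2
    obtain ⟨hc1, hc2, hc3⟩ := minChild_facts h pos hl
    have hpc : pos ≠ minChild h pos := by omega
    have key : ∀ t, lget ((h.set pos (lget h (minChild h pos))).set (minChild h pos) (lget h pos)) t
        = if t = minChild h pos then lget h pos else if t = pos then lget h (minChild h pos) else lget h t :=
      fun t => lget_swap h pos (minChild h pos) t _ _ (by omega) hc2 hpc
    rw [siftupA, dif_pos hl, if_pos hswap]
    apply ih
    · intro i hi0 hin hic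
      simp only [List.length_set] at hin
      rw [key i, key ((i - 1) / 2)]
      by_cases e1 : i = minChild h pos
      · rw [if_pos e1, if_neg (show (i - 1) / 2 ≠ minChild h pos by omega),
            if_pos (by rw [e1]; exact hc3)]
        exact le_of_lt hswap
      · rw [if_neg e1]
        by_cases e2 : i = pos
        · subst e2
          rw [if_neg (show (i - 1) / 2 ≠ minChild h i by omega),
              if_neg (show (i - 1) / 2 ≠ i by omega), if_pos rfl]
          exact h2 _ hc2 hc3 (by omega)
        · by_cases e3 : (i - 1) / 2 = pos
          · rw [if_neg (show (i - 1) / 2 ≠ minChild h pos by omega), if_pos e3, if_neg e2]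
            exact minChild_min h pos hl i hin e3 hi0
          · rw [if_neg (show (i - 1) / 2 ≠ minChild h pos from hic), if_neg e3, if_neg e2]
            exact h1 i hi0 hin e3
    · intro j hjn hjc _
      simp only [List.length_set] at hjn
      rw [key j, key ((minChild h pos - 1) / 2), hc3]
      rw [if_neg (show pos ≠ minChild h pos from hpc), if_pos rfl,
          if_neg (show j ≠ minChild h pos by omega), if_neg (show j ≠ pos by omega)]
      have := h1 j (by omega) hjn (by omega)
      rw [hjc] at this
      exact this
  | case2 h pos hl hswap =>
    intro h1 h2 i hi0 hin
    rw [siftupA, dif_pos hl, if_neg hswap] at hin ⊢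
    by_cases e : (i - 1) / 2 = pos
    · calc lget h ((i - 1) / 2) = lget h pos := by rw [e]
        _ ≤ lget h (minChild h pos) := le_of_not_gt (by simpa using hswap)
        _ ≤ lget h i := minChild_min h pos hl i hin e hi0
    · exact h1 i hi0 hin e
  | case3 h pos hl =>
    intro h1 h2 i hi0 hin
    rw [siftupA, dif_neg hl] at hin ⊢
    by_cases e : (i - 1) / 2 = pos
    · omega
    · exact h1 i hi0 hin e

theorem heappopA_spec (h : List Int) (hne : h ≠ []) (hh : IsHeap h) :
    (heappopA h).1 = lget h 0 ∧ IsHeap (heappopA h).2 ∧ ((heappopA h).1 :: (heappopA h).2).Perm h := by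
  rcases List.eq_nil_or_concat h with rfl | ⟨rest, last, rfl⟩
  · exact absurd rfl hne
  · simp only [List.concat_eq_append] at hh ⊢
    have hgl : (rest ++ [last]).getLast? = some last := List.getLast?_concat
    have hdl : (rest ++ [last]).dropLast = rest := List.dropLast_concat
    unfold heappopA
    rw [hgl, hdl]
    cases rest with
    | nil =>
      exact ⟨rfl, fun i hi0 hin => absurd hin (by simp), List.Perm.refl _⟩
    | cons r0 rt =>
      simp only [List.isEmpty_cons, if_neg Bool.false_ne_true]
      have hlen : r0 :: rt ≠ ([] : List Int) := by simp
      refine ⟨?_, ?_, ?_⟩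
      · exact (lget_append_lt (r0 :: rt) last 0 (by simp)).symm
      · apply siftupA_isHeap
        · intro i hi0 hin e
          simp only [List.length_set] at hin
          rw [lget_set, lget_set, if_neg (by omega), if_neg (by omega)]
          have e1 : lget (r0 :: rt) ((i - 1) / 2) = lget ((r0 :: rt) ++ [last]) ((i - 1) / 2) :=
            (lget_append_lt _ _ _ (by simp at hin ⊢; omega)).symm
          have e2 : lget (r0 :: rt) i = lget ((r0 :: rt) ++ [last]) i :=
            (lget_append_lt _ _ _ hin).symm
          rw [e1, e2]
          exact hh i hi0 (by simp at hin ⊢; omega)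
        · intro j hj hjp h00
          exact absurd h00 (by omega)
      · have hset : (r0 :: rt).set 0 last = last :: rt := rfl
        refine List.Perm.trans (List.Perm.cons _ (hset ▸ siftupA_perm ((r0 :: rt).set 0 last) 0)) ?_
        exact List.Perm.cons r0 (List.perm_append_singleton last rt).symm

theorem heap_root_min (pq : List Int) (hheap : IsHeap pq) (x : Int) (hx : x ∈ pq) :
    lget pq 0 ≤ x := by
  obtain ⟨j, hj, rfl⟩ := List.getElem_of_mem hx
  rw [← lget_eq_getElem pq j hj]
  exact isHeap_root_le pq hheap j hj

-- ----- B-side: the pool of still-live values and the queue invariant -----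

def Pool (base mixed : List Int) (i j : Nat) : List Int := base.drop i ++ mixed.drop j

-- every live mixed entry m was built as a'+2b' with b' ≤ everything that is
-- still live and was present then: enough to bound the next mix from below
def InvB (base mixed : List Int) (i j : Nat) : Prop :=
  ∀ t : Nat, j ≤ t → t < mixed.length →
    ∃ β : Int, lget mixed t ≤ 3 * β ∧
      (∀ x ∈ base.drop i, β ≤ x) ∧
      (∀ s : Nat, j ≤ s → s < t → β ≤ lget mixed s)

def RB (pq base mixed : List Int) (i j : Nat) : Prop :=
  pq.Perm (Pool base mixed i j) ∧ IsHeap pq ∧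
  base.Pairwise (· ≤ ·) ∧ (mixed.drop j).Pairwise (· ≤ ·) ∧
  i ≤ base.length ∧ j ≤ mixed.length ∧ InvB base mixed i j

theorem drop_cons_lget (l : List Int) (n : Nat) (hn : n < l.length) :
    l.drop n = lget l n :: l.drop (n + 1) := by
  rw [lget_eq_getElem l n hn]
  exact List.drop_eq_getElem_cons hn

theorem mem_drop_mono (l : List Int) (i i' : Nat) (hii : i ≤ i') (x : Int)
    (hx : x ∈ l.drop i') : x ∈ l.drop i := by
  have he : l.drop i' = (l.drop i).drop (i' - i) := by
    rw [List.drop_drop]; congr 1; omega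
  rw [he] at hx
  exact List.mem_of_mem_drop hx

theorem drop_sorted_mono (l : List Int) (j j' : Nat) (hm : (l.drop j).Pairwise (· ≤ ·))
    (hjj : j ≤ j') : (l.drop j').Pairwise (· ≤ ·) := by
  have he : l.drop j' = (l.drop j).drop (j' - j) := by
    rw [List.drop_drop]; congr 1; omega
  rw [he]; exact hm.sublist (List.drop_sublist _ _)

theorem head_drop_le (l : List Int) (n : Nat) (hs : (l.drop n).Pairwise (· ≤ ·))
    (hn : n < l.length) (x : Int) (hx : x ∈ l.drop n) : lget l n ≤ x := by
  rw [drop_cons_lget l n hn] at hs hx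
  rcases List.mem_cons.1 hx with h | hx
  · exact le_of_eq h.symm
  · exact (List.pairwise_cons.1 hs).1 x hx

theorem lget_mem_drop (l : List Int) (n t : Nat) (hn : n ≤ t) (ht : t < l.length) :
    lget l t ∈ l.drop n := by
  have h1 : t - n < (l.drop n).length := by simp; omega
  have h2 : (l.drop n)[t - n] = l[t] := by
    rw [List.getElem_drop]; congr 1; omega
  rw [lget_eq_getElem l t ht, ← h2]
  exact List.getElem_mem h1

theorem mem_drop_index (l : List Int) (n : Nat) (x : Int) (hx : x ∈ l.drop n) :
    ∃ t : Nat, n ≤ t ∧ t < l.length ∧ lget l t = x := by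
  obtain ⟨k, hk, he⟩ := List.getElem_of_mem hx
  have hkl : n + k < l.length := by simp at hk; omega
  refine ⟨n + k, by omega, hkl, ?_⟩
  rw [lget_eq_getElem l (n + k) hkl, ← he, List.getElem_drop]

theorem lget_append_self (l : List Int) (x : Int) : lget (l ++ [x]) l.length = x := by
  simp [lget, List.getD_eq_getElem?_getD]

theorem front_min (base mixed : List Int) (i j : Nat)
    (hb : base.Pairwise (· ≤ ·)) (hm : (mixed.drop j).Pairwise (· ≤ ·))
    (hi : i ≤ base.length) (hj : j ≤ mixed.length) (hne : Pool base mixed i j ≠ []) :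
    frontB base mixed i j ∈ Pool base mixed i j ∧
      ∀ x ∈ Pool base mixed i j, frontB base mixed i j ≤ x := by
  by_cases hc : i < base.length ∧ (j = mixed.length ∨ lget base i ≤ lget mixed j)
  · rw [frontB, if_pos hc]
    constructor
    · exact List.mem_append_left _ (lget_mem_drop base i i (le_refl i) hc.1)
    · intro x hx
      rcases List.mem_append.1 hx with hx | hx
      · exact head_drop_le base i (hb.sublist (List.drop_sublist _ _)) hc.1 x hx
      · have hjl : j < mixed.length := by
          by_contra hjl
          have : mixed.drop j = [] := List.drop_eq_nil_of_le (by omega)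
          rw [this] at hx; exact absurd hx (List.not_mem_nil)
        rcases hc.2 with h | h
        · omega
        · exact le_trans h (head_drop_le mixed j hm hjl x hx)
  · rw [frontB, if_neg hc]
    have hjl : j < mixed.length := by
      by_cases hil : i < base.length
      · rcases Nat.lt_or_ge j mixed.length with h | h
        · exact h
        · exact absurd ⟨hil, Or.inl (by omega)⟩ hc
      · have hbd : base.drop i = [] := List.drop_eq_nil_of_le (by omega)
        rcases Nat.lt_or_ge j mixed.length with h | h
        · exact h
        · have hmd : mixed.drop j = [] := List.drop_eq_nil_of_le (by omega)
          exact absurd (by rw [Pool, hbd, hmd]; rfl) hne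
    constructor
    · exact List.mem_append_right _ (lget_mem_drop mixed j j (le_refl j) hjl)
    · intro x hx
      rcases List.mem_append.1 hx with hx | hx
      · have hil : i < base.length := by
          by_contra hil
          have : base.drop i = [] := List.drop_eq_nil_of_le (by omega)
          rw [this] at hx; exact absurd hx (List.not_mem_nil)
        have hmb : lget mixed j ≤ lget base i := by
          by_contra hmb
          exact hc ⟨hil, Or.inr (by omega)⟩
        exact le_trans hmb (head_drop_le base i (hb.sublist (List.drop_sublist _ _)) hil x hx)
      · exact head_drop_le mixed j hm hjl x hx

theorem root_front (pq base mixed : List Int) (i j : Nat)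
    (hperm : pq.Perm (Pool base mixed i j)) (hheap : IsHeap pq)
    (hb : base.Pairwise (· ≤ ·)) (hm : (mixed.drop j).Pairwise (· ≤ ·))
    (hi : i ≤ base.length) (hj : j ≤ mixed.length) (hne : pq ≠ []) :
    lget pq 0 = frontB base mixed i j := by
  have hpoolne : Pool base mixed i j ≠ [] := by
    intro e; rw [e] at hperm; exact hne (List.perm_nil.1 hperm)
  obtain ⟨hmem, hmin⟩ := front_min base mixed i j hb hm hi hj hpoolne
  have hl0 : 0 < pq.length := List.length_pos_iff.2 hne
  have h1 : lget pq 0 ≤ frontB base mixed i j :=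
    heap_root_min pq hheap _ (hperm.mem_iff.2 hmem)
  have h2 : frontB base mixed i j ≤ lget pq 0 := by
    apply hmin
    rw [lget_eq_getElem pq 0 hl0]
    exact hperm.mem_iff.1 (List.getElem_mem hl0)
  omega

theorem pop_step (base mixed : List Int) (i j : Nat)
    (hi : i ≤ base.length) (hj : j ≤ mixed.length) (hne : Pool base mixed i j ≠ []) :
    (popB base mixed i j).1 = frontB base mixed i j ∧
    (Pool base mixed i j).Perm
      ((popB base mixed i j).1 :: Pool base mixed (popB base mixed i j).2.1 (popB base mixed i j).2.2) ∧
    ((i < base.length ∧ (popB base mixed i j).1 = lget base i ∧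
        (popB base mixed i j).2.1 = i + 1 ∧ (popB base mixed i j).2.2 = j) ∨
     (j < mixed.length ∧ (popB base mixed i j).1 = lget mixed j ∧
        (popB base mixed i j).2.1 = i ∧ (popB base mixed i j).2.2 = j + 1)) := by
  by_cases hc : i < base.length ∧ (j = mixed.length ∨ lget base i ≤ lget mixed j)
  · rw [popB, frontB, if_pos hc, if_pos hc]
    refine ⟨rfl, ?_, Or.inl ⟨hc.1, rfl, rfl, rfl⟩⟩
    have he : base.drop i = lget base i :: base.drop (i + 1) := drop_cons_lget base i hc.1
    rw [Pool, Pool, he]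
    exact List.Perm.refl _
  · rw [popB, frontB, if_neg hc, if_neg hc]
    have hjl : j < mixed.length := by
      by_cases hil : i < base.length
      · rcases Nat.lt_or_ge j mixed.length with h | h
        · exact h
        · exact absurd ⟨hil, Or.inl (by omega)⟩ hc
      · have hbd : base.drop i = [] := List.drop_eq_nil_of_le (by omega)
        rcases Nat.lt_or_ge j mixed.length with h | h
        · exact h
        · have hmd : mixed.drop j = [] := List.drop_eq_nil_of_le (by omega)
          exact absurd (by rw [Pool, hbd, hmd]; rfl) hne
    refine ⟨rfl, ?_, Or.inr ⟨hjl, rfl, rfl, rfl⟩⟩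
    have he : mixed.drop j = lget mixed j :: mixed.drop (j + 1) := drop_cons_lget mixed j hjl
    rw [Pool, Pool, he]
    exact List.perm_middle

theorem loopB_succ (fuel : Nat) (base mixed : List Int) (i j : Nat) (K answer : Int) :
    loopB (fuel + 1) base mixed i j K answer =
      if frontB base mixed i j < K then
        if (base.length - (popB base mixed (popB base mixed i j).2.1 (popB base mixed i j).2.2).2.1) +
            ((mixed ++ [(popB base mixed i j).1 + 2 * (popB base mixed (popB base mixed i j).2.1 (popB base mixed i j).2.2).1]).length -
              (popB base mixed (popB base mixed i j).2.1 (popB base mixed i j).2.2).2.2) = 1 ∧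
            lget (mixed ++ [(popB base mixed i j).1 + 2 * (popB base mixed (popB base mixed i j).2.1 (popB base mixed i j).2.2).1])
              (popB base mixed (popB base mixed i j).2.1 (popB base mixed i j).2.2).2.2 < K
        then -1
        else loopB fuel base
          (mixed ++ [(popB base mixed i j).1 + 2 * (popB base mixed (popB base mixed i j).2.1 (popB base mixed i j).2.2).1])
          (popB base mixed (popB base mixed i j).2.1 (popB base mixed i j).2.2).2.1
          (popB base mixed (popB base mixed i j).2.1 (popB base mixed i j).2.2).2.2 K (answer + 1)
      else answer := rfl

theorem loopA_succ (fuel : Nat) (pq : List Int) (K answer : Int) :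
    loopA (fuel + 1) pq K answer =
      if lget pq 0 < K then
        if (heappushA (heappopA (heappopA pq).2).2
              ((heappopA pq).1 + (heappopA (heappopA pq).2).1 * 2)).length = 1 ∧
            lget (heappushA (heappopA (heappopA pq).2).2
              ((heappopA pq).1 + (heappopA (heappopA pq).2).1 * 2)) 0 < K then -1
        else loopA fuel (heappushA (heappopA (heappopA pq).2).2
              ((heappopA pq).1 + (heappopA (heappopA pq).2).1 * 2)) K (answer + 1)
      else answer := rfl

theorem loop_eq (fuel : Nat) (pq base mixed : List Int) (i j : Nat) (K answer : Int)
    (hr : RB pq base mixed i j) (hne : pq ≠ [])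
    (h1 : pq.length = 1 → K ≤ lget pq 0) :
    loopA fuel pq K answer = loopB fuel base mixed i j K answer := by
  induction fuel generalizing pq mixed i j answer with
  | zero => rfl
  | succ fuel ih =>
    obtain ⟨hperm, hheap, hb, hm, hi, hj, hinv⟩ := hr
    have hpoolne : Pool base mixed i j ≠ [] := by
      intro e; rw [e] at hperm; exact hne (List.perm_nil.1 hperm)
    have hroot : lget pq 0 = frontB base mixed i j :=
      root_front pq base mixed i j hperm hheap hb hm hi hj hne
    rw [loopA_succ, loopB_succ, hroot]
    by_cases hK : frontB base mixed i j < K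
    · rw [if_pos hK, if_pos hK]
      -- pq has at least two elements
      have hl2 : 2 ≤ pq.length := by
        have h0 : 0 < pq.length := List.length_pos_iff.2 hne
        rcases Nat.lt_or_ge pq.length 2 with h | h
        · have : pq.length = 1 := by omega
          have := h1 this
          rw [hroot] at this
          omega
        · exact h
      -- first pops
      obtain ⟨hv1A, hh1, hp1A⟩ := heappopA_spec pq hne hheap
      obtain ⟨hv1B, hp1B, hsrc1⟩ := pop_step base mixed i j hi hj hpoolne
      have hv1 : (heappopA pq).1 = (popB base mixed i j).1 := by rw [hv1A, hroot, hv1B]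
      have hb1i : (popB base mixed i j).2.1 ≤ base.length := by rcases hsrc1 with ⟨h,_,h2,_⟩|⟨_,_,h2,_⟩ <;> omega
      have hb1j : (popB base mixed i j).2.2 ≤ mixed.length := by rcases hsrc1 with ⟨_,_,_,h2⟩|⟨h,_,_,h2⟩ <;> omega
      have hii1 : i ≤ (popB base mixed i j).2.1 := by rcases hsrc1 with ⟨_,_,h2,_⟩|⟨_,_,h2,_⟩ <;> omega
      have hjj1 : j ≤ (popB base mixed i j).2.2 := by rcases hsrc1 with ⟨_,_,_,h2⟩|⟨_,_,_,h2⟩ <;> omega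
      have hm1 : (mixed.drop (popB base mixed i j).2.2).Pairwise (· ≤ ·) :=
        drop_sorted_mono mixed j _ hm hjj1
      have hrest1 : (heappopA pq).2.Perm (Pool base mixed (popB base mixed i j).2.1 (popB base mixed i j).2.2) := by
        have h := hp1A.trans (hperm.trans hp1B)
        rw [hv1] at h
        exact h.cons_inv
      have hrest1ne : (heappopA pq).2 ≠ [] := by
        have hle := hp1A.length_eq
        simp at hle
        intro e; rw [e] at hle; simp at hle; omega
      have hpool1ne : Pool base mixed (popB base mixed i j).2.1 (popB base mixed i j).2.2 ≠ [] := by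
        intro e; rw [e] at hrest1; exact hrest1ne (List.perm_nil.1 hrest1)
      -- second pops
      obtain ⟨hv2A, hh2, hp2A⟩ := heappopA_spec _ hrest1ne hh1
      obtain ⟨hv2B, hp2B, hsrc2⟩ := pop_step base mixed (popB base mixed i j).2.1 (popB base mixed i j).2.2 hb1i hb1j hpool1ne
      have hroot1 : lget (heappopA pq).2 0 = frontB base mixed (popB base mixed i j).2.1 (popB base mixed i j).2.2 :=
        root_front _ base mixed _ _ hrest1 hh1 hb hm1 hb1i hb1j hrest1ne
      have hv2 : (heappopA (heappopA pq).2).1 =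
          (popB base mixed (popB base mixed i j).2.1 (popB base mixed i j).2.2).1 := by
        rw [hv2A, hroot1, hv2B]
      -- abbreviations
      set p1 := popB base mixed i j with hp1def
      set p2 := popB base mixed p1.2.1 p1.2.2 with hp2def
      set c := p1.1 + 2 * p2.1 with hcdef
      have hcA : (heappopA pq).1 + (heappopA (heappopA pq).2).1 * 2 = c := by
        rw [hv1, hv2, hcdef]; ring
      rw [hcA]
      have hb2i : p2.2.1 ≤ base.length := by rcases hsrc2 with ⟨h,_,h2,_⟩|⟨_,_,h2,_⟩ <;> omega
      have hb2j : p2.2.2 ≤ mixed.length := by rcases hsrc2 with ⟨_,_,_,h2⟩|⟨h,_,_,h2⟩ <;> omega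
      have hii2 : p1.2.1 ≤ p2.2.1 := by rcases hsrc2 with ⟨_,_,h2,_⟩|⟨_,_,h2,_⟩ <;> omega
      have hjj2 : p1.2.2 ≤ p2.2.2 := by rcases hsrc2 with ⟨_,_,_,h2⟩|⟨_,_,_,h2⟩ <;> omega
      have hrest2 : (heappopA (heappopA pq).2).2.Perm (Pool base mixed p2.2.1 p2.2.2) := by
        have h := hp2A.trans (hrest1.trans hp2B)
        rw [hv2] at h
        exact h.cons_inv
      -- a <= b
      obtain ⟨hfm1mem, hfm1min⟩ := front_min base mixed i j hb hm hi hj hpoolne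
      obtain ⟨hfm2mem, hfm2min⟩ := front_min base mixed p1.2.1 p1.2.2 hb hm1 hb1i hb1j hpool1ne
      have hab : p1.1 ≤ p2.1 := by
        rw [hv1B, hv2B]
        apply hfm1min
        apply hp1B.mem_iff.2
        exact List.mem_cons_of_mem _ (hv2B ▸ hfm2mem)
      -- b is ≤ everything in Pool1
      have hbmin : ∀ x ∈ Pool base mixed p1.2.1 p1.2.2, p2.1 ≤ x := by
        intro x hx; rw [hv2B]; exact hfm2min x hx
      -- the key inequality: every live mixed entry is ≤ c
      have hkey : ∀ m ∈ mixed.drop p2.2.2, m ≤ c := by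
        intro m hmm
        obtain ⟨t, htj, htl, hte⟩ := mem_drop_index mixed p2.2.2 m hmm
        obtain ⟨β, hβ1, hβ2, hβ3⟩ := hinv t (by omega) htl
        have hβa : β ≤ p1.1 := by
          rcases hsrc1 with ⟨hil, hval, _, _⟩ | ⟨hjl, hval, _, hj1⟩
          · rw [hval]
            exact hβ2 _ (lget_mem_drop base i i (le_refl i) hil)
          · rw [hval]
            exact hβ3 j (le_refl j) (by omega)
        have hβb : β ≤ p2.1 := by
          rcases hsrc2 with ⟨hil, hval, _, _⟩ | ⟨hjl, hval, _, hj2⟩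
          · rw [hval]
            exact hβ2 _ (mem_drop_mono base i p1.2.1 hii1 _ (lget_mem_drop base p1.2.1 p1.2.1 (le_refl _) hil))
          · rw [hval]
            exact hβ3 p1.2.2 hjj1 (by omega)
        rw [← hte]
        omega
      -- new mixed queue
      have hdrop2 : (mixed ++ [c]).drop p2.2.2 = mixed.drop p2.2.2 ++ [c] :=
        List.drop_append_of_le_length hb2j
      have hml : (mixed ++ [c]).length = mixed.length + 1 := by simp
      have hm2sorted : ((mixed ++ [c]).drop p2.2.2).Pairwise (· ≤ ·) := by
        rw [hdrop2]
        rw [List.pairwise_append]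
        refine ⟨drop_sorted_mono mixed j p2.2.2 hm (by omega), by simp, ?_⟩
        intro m hmm y hy
        rw [List.mem_singleton.1 hy]
        exact hkey m hmm
      -- the new pool and heap
      have hpoolnew : (heappushA (heappopA (heappopA pq).2).2 c).Perm
          (Pool base (mixed ++ [c]) p2.2.1 p2.2.2) := by
        refine (heappushA_perm _ c).trans ?_
        refine ((hrest2.cons c).trans ?_)
        rw [Pool, Pool, hdrop2, ← List.append_assoc]
        exact (List.perm_append_singleton c _).symm
      have hheap3 : IsHeap (heappushA (heappopA (heappopA pq).2).2 c) :=
        heappushA_isHeap _ c hh2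
      -- lengths agree
      have hlenpool : (heappushA (heappopA (heappopA pq).2).2 c).length =
          (base.length - p2.2.1) + ((mixed ++ [c]).length - p2.2.2) := by
        rw [hpoolnew.length_eq, Pool, List.length_append, List.length_drop, List.length_drop]
      have hlen1 : (heappushA (heappopA (heappopA pq).2).2 c).length = pq.length - 1 := by
        have e1 := hp1A.length_eq
        have e2 := hp2A.length_eq
        have e3 := (heappushA_perm (heappopA (heappopA pq).2).2 c).length_eq
        simp at e1 e2 e3
        omega
      -- the new InvB
      have hinvnew : InvB base (mixed ++ [c]) p2.2.1 p2.2.2 := by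
        intro t ht htl
        simp at htl
        rcases Nat.lt_or_ge t mixed.length with htlt | htge
        · obtain ⟨β, hβ1, hβ2, hβ3⟩ := hinv t (by omega) htlt
          refine ⟨β, ?_, ?_, ?_⟩
          · rw [lget_append_lt mixed c t htlt]; exact hβ1
          · intro x hx
            exact hβ2 x (mem_drop_mono base i p2.2.1 (by omega) x hx)
          · intro s hs hst
            rw [lget_append_lt mixed c s (by omega)]
            exact hβ3 s (by omega) hst
        · have hteq : t = mixed.length := by omega
          refine ⟨p2.1, ?_, ?_, ?_⟩
          · rw [hteq, lget_append_self]
            omega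
          · intro x hx
            apply hbmin
            exact List.mem_append_left _ (mem_drop_mono base p1.2.1 p2.2.1 hii2 x hx)
          · intro s hs hst
            have hsl : s < mixed.length := by omega
            rw [lget_append_lt mixed c s hsl]
            apply hbmin
            exact List.mem_append_right _ (lget_mem_drop mixed p1.2.2 s (by omega) hsl)
      -- branch condition equivalence
      by_cases hone : (heappushA (heappopA (heappopA pq).2).2 c).length = 1
      · -- the pool is exactly [c]
        have hcnt : (base.length - p2.2.1) + ((mixed ++ [c]).length - p2.2.2) = 1 := by omega
        have hbd : base.drop p2.2.1 = [] := List.drop_eq_nil_of_le (by omega)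
        have hj2len : p2.2.2 = mixed.length := by omega
        have hmd : mixed.drop p2.2.2 = [] := List.drop_eq_nil_of_le (by omega)
        have hpool1 : Pool base (mixed ++ [c]) p2.2.1 p2.2.2 = [c] := by
          rw [Pool, hdrop2, hbd, hmd]; rfl
        have hgB : lget (mixed ++ [c]) p2.2.2 = c := by rw [hj2len, lget_append_self]
        have hgA : lget (heappushA (heappopA (heappopA pq).2).2 c) 0 = c := by
          have := List.perm_singleton.1 (hpoolnew.trans (by rw [hpool1]))
          rw [this]
          rfl
        rw [hgA, hgB]
        by_cases hcK : c < K
        · rw [if_pos ⟨hone, hcK⟩, if_pos ⟨hcnt, hcK⟩]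
        · rw [if_neg (fun h => hcK h.2), if_neg (fun h => hcK h.2)]
          apply ih
          · exact ⟨hpoolnew, hheap3, hb, hm2sorted, hb2i, by omega, hinvnew⟩
          · intro e; rw [e] at hone; simp at hone
          · intro _
            rw [hgA]
            omega
      · have hcnt : ¬ ((base.length - p2.2.1) + ((mixed ++ [c]).length - p2.2.2) = 1) := by omega
        rw [if_neg (fun h => hone h.1), if_neg (fun h => hcnt h.1)]
        apply ih
        · exact ⟨hpoolnew, hheap3, hb, hm2sorted, hb2i, by omega, hinvnew⟩
        · intro e
          rw [e] at hlen1
          simp at hlen1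
          omega
        · intro he
          exact absurd he hone
    · rw [if_neg hK, if_neg hK]

theorem build_heap (l : List Int) (acc : List Int) (hh : IsHeap acc) :
    IsHeap (l.foldl heappushA acc) ∧ (l.foldl heappushA acc).Perm (acc ++ l) := by
  induction l generalizing acc with
  | nil => exact ⟨hh, by simp⟩
  | cons x xs ih =>
    obtain ⟨ha, hb⟩ := ih (heappushA acc x) (heappushA_isHeap acc x hh)
    refine ⟨ha, hb.trans ?_⟩
    exact (((heappushA_perm acc x).append_right xs).trans List.perm_middle.symm)

-- ===== VERDICT (by name: the statement is the Claim_ definition above) =====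
theorem solution_spec : Claim_equal_solution := by
  intro scoville K _ hpre
  unfold Spec_solution solution solution_alt
  obtain ⟨hheap, hperm⟩ := build_heap scoville [] (fun i hi0 hin => absurd hin (by simp))
  have hperm' : (scoville.foldl heappushA []).Perm scoville := hperm.trans (by simp)
  have hsortperm := PySem.List.sorted_perm scoville (fun x => x) false
  apply loop_eq
  · refine ⟨?_, hheap, ?_, ?_, ?_, ?_, ?_⟩
    · simpa [Pool] using hperm'.trans hsortperm.symm
    · simpa using PySem.List.sorted_pairwise scoville (fun x => x)
    · simp
    · simp
    · simp
    · intro t ht htl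
      simp at htl
  · intro e
    rw [e] at hperm'
    exact hpre.1 (List.perm_nil.1 hperm'.symm)
  · intro hl1
    have hl1' : scoville.length = 1 := by
      have := hperm'.length_eq; omega
    obtain ⟨v, hv⟩ := List.length_eq_one_iff.1 hl1'
    have : (scoville.foldl heappushA []).Perm [v] := hv ▸ hperm'
    rw [List.perm_singleton.1 this]
    have := hpre.2 hl1'
    rw [hv] at this
    simpa [lget] using this
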